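-- pv_equiv track=rewrite | github.com/cendhikaimantoro/Tubes-1-Kripto-Steganografi | app/tools/BPCS/messagebitplane.py | byteArrToPlanes
-- ===== SOURCE A (Python) =====
-- def byteArrToPlanes(byteArr):
--     copy = bytearray(byteArr)
--     remainder = len(copy)%8
--     if remainder != 0:
--         for i in range(8-remainder):
--             copy.append(0)
--
--     bitArr = []
--     for byte in copy:
--         bits = bin(byte)[2:]
--         bits = '00000000'[len(bits):] + bits
--         bitArr.extend([int(b) for b in bits])
--
--     numofplane = len(bitArr)//64
--     if len(bitArr)%64 != 0 :
--             numofplane += 1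
--     planes = []
--
--     k = 0
--     for i in range(numofplane):
--         plane = [[0 for i in range(8)] for j in range(8)]
--         for i in range(8):
--             for j in range(8):
--                 plane[i][j] = bitArr[k]
--                 k+=1
--         planes.append(plane)
--
--     return planes
-- ===== SOURCE B (Python) =====
-- def byteArrToPlanes(byteArr):
--     copy = bytes(byteArr)
--     if len(copy) % 8 != 0:
--         copy += bytes(8 - len(copy) % 8)
--     return [[[(copy[p * 8 + i] >> (7 - j)) & 1 for j in range(8)]
--              for i in range(8)]
--             for p in range(len(copy) // 8)]
-- ===== Notes on version B (the rewrite author's own statement) =====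
-- stated objective: simpler
-- what changed: B drops the intermediate flat bit list and its sequential k-counter reshape: after the same zero-padding it computes each 8x8 plane entry directly from the padded bytes with shift-and-mask bit arithmetic instead of bin()-string formatting and extend/reindex.
import Mathlib
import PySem

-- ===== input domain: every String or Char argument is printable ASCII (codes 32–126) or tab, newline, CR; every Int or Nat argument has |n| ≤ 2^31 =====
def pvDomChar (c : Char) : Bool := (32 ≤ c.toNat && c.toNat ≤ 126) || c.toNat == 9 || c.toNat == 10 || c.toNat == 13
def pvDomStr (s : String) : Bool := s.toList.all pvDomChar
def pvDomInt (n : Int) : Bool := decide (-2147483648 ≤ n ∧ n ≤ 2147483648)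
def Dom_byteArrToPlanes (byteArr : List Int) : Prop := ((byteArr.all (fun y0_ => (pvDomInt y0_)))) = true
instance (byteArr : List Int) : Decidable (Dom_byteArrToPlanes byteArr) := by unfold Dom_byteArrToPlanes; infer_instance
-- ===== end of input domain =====

-- B replaces A's flat bit list (built with bin()-string formatting) and its sequential
-- k-counter reshape by computing each 8x8 plane entry directly from the zero-padded
-- bytes with shift-and-mask bit arithmetic (objective: simpler).

-- ===== PORT A =====

-- Python's bin(n)[2:] for n > 0, as a list of 0/1 digits (MSB first).
-- Structural recursion on a fuel argument; fuel = n always suffices because the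
-- argument halves at every step, so this is exact for every n.
def pvBinAux : Nat → Nat → List Int
  | 0, _ => []
  | fuel + 1, n => if n = 0 then [] else pvBinAux fuel (n / 2) ++ [((n % 2 : Nat) : Int)]

-- bits = bin(byte)[2:]  (bin(0)[2:] = "0"), digits as ints
def pvBin (n : Nat) : List Int := if n = 0 then [0] else pvBinAux n n

-- bits = '00000000'[len(bits):] + bits ; [int(b) for b in bits]
def pvPad8 (bits : List Int) : List Int := List.replicate (8 - bits.length) 0 ++ bits

def byteArrToPlanes (byteArr : List Int) : List (List (List Int)) :=
  -- copy = bytearray(byteArr); pad with zeros to a multiple of 8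
  let copy := if byteArr.length % 8 ≠ 0
              then byteArr ++ List.replicate (8 - byteArr.length % 8) 0
              else byteArr
  -- for byte in copy: bitArr.extend(...)
  let bitArr := copy.flatMap (fun byte => pvPad8 (pvBin byte.toNat))
  let numofplane := bitArr.length / 64 + (if bitArr.length % 64 ≠ 0 then 1 else 0)
  -- planes built with the sequential counter k; bitArr[k] never goes out of range
  -- on inputs A accepts (padding makes len(bitArr) a multiple of 64), getD 0 is exact there
  ((List.range numofplane).foldl
    (fun (acc : List (List (List Int)) × Nat) _ =>
      let inner := (List.range 8).foldl
        (fun (acc2 : List (List Int) × Nat) _ =>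
          let row := (List.range 8).foldl
            (fun (acc3 : List Int × Nat) _ =>
              (acc3.1 ++ [bitArr.getD acc3.2 0], acc3.2 + 1)) ([], acc2.2)
          (acc2.1 ++ [row.1], row.2)) ([], acc.2)
      (acc.1 ++ [inner.1], inner.2)) ([], 0)).1

-- ===== PORT B =====
def byteArrToPlanes_alt (byteArr : List Int) : List (List (List Int)) :=
  let copy := if byteArr.length % 8 ≠ 0
              then byteArr ++ List.replicate (8 - byteArr.length % 8) 0
              else byteArr
  (List.range (copy.length / 8)).map (fun p =>
    (List.range 8).map (fun i =>
      (List.range 8).map (fun j =>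
        ((((copy.getD (p * 8 + i) 0).toNat >>> (7 - j)) &&& 1 : Nat) : Int))))

-- ===== PRECONDITION & SPEC =====
-- Pre_ excludes exactly the inputs on which Python A raises: bytearray(byteArr)
-- raises ValueError whenever some element is not in range(0, 256).
def Pre_byteArrToPlanes (byteArr : List Int) : Prop := ∀ x ∈ byteArr, 0 ≤ x ∧ x < 256
instance (byteArr : List Int) : Decidable (Pre_byteArrToPlanes byteArr) := by
  unfold Pre_byteArrToPlanes; infer_instance

def pvWitness_byteArrToPlanes : List Int := [7, 255, 0]

def Spec_byteArrToPlanes (byteArr : List Int) (out : List (List (List Int))) : Prop := out = byteArrToPlanes_alt byteArr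
instance (byteArr : List Int) (out : List (List (List Int))) : Decidable (Spec_byteArrToPlanes byteArr out) := by unfold Spec_byteArrToPlanes; infer_instance

-- ===== CLAIM (what is proved, stated in full; the proofs are below) =====
def Claim_equal_byteArrToPlanes : Prop := ∀ (byteArr : List Int), Dom_byteArrToPlanes byteArr → Pre_byteArrToPlanes byteArr → Spec_byteArrToPlanes byteArr (byteArrToPlanes byteArr)

-- ===== LEMMAS AND PROOFS =====

-- A's bit-string of one byte equals B's shift-and-mask bits, for every byte value.
set_option maxRecDepth 4000 in
theorem pvPad8_pvBin_eq (n : Nat) (h : n < 256) :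
    pvPad8 (pvBin n) = (List.range 8).map (fun j => (((n >>> (7 - j)) &&& 1 : Nat) : Int)) := by
  revert n h; decide

theorem pvPad8_pvBin_length (n : Nat) (h : n < 256) : (pvPad8 (pvBin n)).length = 8 := by
  rw [pvPad8_pvBin_eq n h]; simp

theorem flatMap_length_eight {α : Type} (f : α → List Int) (l : List α)
    (hf : ∀ a ∈ l, (f a).length = 8) : (l.flatMap f).length = 8 * l.length := by
  induction l with
  | nil => simp
  | cons a t ih =>
    simp only [List.flatMap_cons, List.length_append, List.length_cons]
    rw [hf a (by simp), ih (fun b hb => hf b (by simp [hb]))]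
    ring

theorem flatMap_getD_eight {α : Type} [Inhabited α] (f : α → List Int) (l : List α)
    (hf : ∀ a ∈ l, (f a).length = 8) (q j : Nat) (hq : q < l.length) (hj : j < 8) :
    (l.flatMap f).getD (8 * q + j) 0 = (f (l.getD q default)).getD j 0 := by
  induction l generalizing q with
  | nil => simp at hq
  | cons a t ih =>
    cases q with
    | zero =>
      simp only [List.flatMap_cons, Nat.mul_zero, Nat.zero_add, List.getD_cons_zero]
      exact List.getD_append _ _ _ _ (by rw [hf a (by simp)]; exact hj)
    | succ q =>
      simp only [List.flatMap_cons, List.getD_cons_succ]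
      have hlen : (f a).length = 8 := hf a (by simp)
      have : 8 * (q + 1) + j = (f a).length + (8 * q + j) := by rw [hlen]; ring
      rw [this, List.getD_append_right _ _ _ _ (by omega), Nat.add_sub_cancel_left]
      exact ih (fun b hb => hf b (by simp [hb])) q (by simpa using hq)

-- the innermost k-counter loop
theorem row_fold (b : List Int) (n : Nat) (r : List Int) (k : Nat) :
    (List.range n).foldl (fun (a3 : List Int × Nat) _ =>
        (a3.1 ++ [b.getD a3.2 0], a3.2 + 1)) (r, k)
      = (r ++ (List.range n).map (fun j => b.getD (k + j) 0), k + n) := by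
  induction n with
  | zero => simp
  | succ n ih =>
    rw [show List.range (n + 1) = List.range n ++ [n] from List.range_succ,
        List.foldl_append, ih, List.foldl_cons, List.foldl_nil]
    simp only [List.map_append, List.map_cons, List.map_nil, List.append_assoc, Prod.mk.injEq]
    exact ⟨trivial, by ring⟩

-- the middle loop (8 bits per row)
theorem mid_fold (b : List Int) (n : Nat) (r : List (List Int)) (k : Nat) :
    (List.range n).foldl (fun (a2 : List (List Int) × Nat) _ =>
        let row := (List.range 8).foldl (fun (a3 : List Int × Nat) _ =>
            (a3.1 ++ [b.getD a3.2 0], a3.2 + 1)) ([], a2.2)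
        (a2.1 ++ [row.1], row.2)) (r, k)
      = (r ++ (List.range n).map (fun i =>
            (List.range 8).map (fun j => b.getD (k + 8 * i + j) 0)), k + 8 * n) := by
  induction n with
  | zero => simp
  | succ n ih =>
    rw [show List.range (n + 1) = List.range n ++ [n] from List.range_succ,
        List.foldl_append, ih, List.foldl_cons, List.foldl_nil]
    simp only [row_fold, List.map_append, List.map_cons, List.map_nil, List.append_assoc,
      List.nil_append, Prod.mk.injEq]
    exact ⟨trivial, by ring⟩

-- the outer loop (planes)
theorem outer_fold (b : List Int) (m : Nat) (r : List (List (List Int))) (k : Nat) :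
    (List.range m).foldl (fun (acc : List (List (List Int)) × Nat) _ =>
        let inner := (List.range 8).foldl (fun (a2 : List (List Int) × Nat) _ =>
            let row := (List.range 8).foldl (fun (a3 : List Int × Nat) _ =>
                (a3.1 ++ [b.getD a3.2 0], a3.2 + 1)) ([], a2.2)
            (a2.1 ++ [row.1], row.2)) ([], acc.2)
        (acc.1 ++ [inner.1], inner.2)) (r, k)
      = (r ++ (List.range m).map (fun p =>
            (List.range 8).map (fun i =>
              (List.range 8).map (fun j => b.getD (k + 64 * p + 8 * i + j) 0))), k + 64 * m) := by
  induction m with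
  | zero => simp
  | succ m ih =>
    rw [show List.range (m + 1) = List.range m ++ [m] from List.range_succ,
        List.foldl_append, ih, List.foldl_cons, List.foldl_nil]
    simp only [mid_fold, List.map_append, List.map_cons, List.map_nil, List.append_assoc,
      List.nil_append, Prod.mk.injEq]
    exact ⟨trivial, by ring⟩

-- ===== VERDICT (by name: the statement is the Claim_ definition above) =====
theorem byteArrToPlanes_spec : Claim_equal_byteArrToPlanes := by
  intro byteArr _ hPre
  unfold Spec_byteArrToPlanes byteArrToPlanes byteArrToPlanes_alt
  set copy := if byteArr.length % 8 ≠ 0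
              then byteArr ++ List.replicate (8 - byteArr.length % 8) 0
              else byteArr with hcopy
  have hmem : ∀ x ∈ copy, 0 ≤ x ∧ x < 256 := by
    intro x hx
    rw [hcopy] at hx
    split at hx
    · rcases List.mem_append.1 hx with h | h
      · exact hPre x h
      · rw [List.eq_of_mem_replicate h]; omega
    · exact hPre x hx
  have hlen8 : copy.length % 8 = 0 := by
    rw [hcopy]
    split
    · simp only [List.length_append, List.length_replicate]; omega
    · omega
  have hflen : ∀ a ∈ copy, (pvPad8 (pvBin a.toNat)).length = 8 := by
    intro a ha
    exact pvPad8_pvBin_length a.toNat (by have := hmem a ha; omega)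
  have hbitlen : (copy.flatMap (fun byte => pvPad8 (pvBin byte.toNat))).length
      = 8 * copy.length := flatMap_length_eight _ _ hflen
  dsimp only
  rw [outer_fold]
  simp only [List.nil_append]
  have hnum : (copy.flatMap (fun byte => pvPad8 (pvBin byte.toNat))).length / 64
      + (if (copy.flatMap (fun byte => pvPad8 (pvBin byte.toNat))).length % 64 ≠ 0 then 1 else 0)
      = copy.length / 8 := by
    rw [hbitlen]
    have h0 : (8 * copy.length) % 64 = 0 := by omega
    rw [h0]
    simp only [ne_eq, not_true_eq_false, if_false]
    omega
  rw [hnum]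
  apply List.map_congr_left
  intro p hp
  apply List.map_congr_left
  intro i hi
  apply List.map_congr_left
  intro j hj
  rw [List.mem_range] at hp hi hj
  have hq : 8 * p + i < copy.length := by omega
  have harith : 0 + 64 * p + 8 * i + j = 8 * (8 * p + i) + j := by ring
  rw [harith, flatMap_getD_eight _ _ hflen (8 * p + i) j hq hj]
  have hel : copy.getD (8 * p + i) default ∈ copy := by
    rw [List.getD_eq_getElem _ _ hq]
    exact List.getElem_mem hq
  have hb := hmem _ hel
  rw [pvPad8_pvBin_eq (copy.getD (8 * p + i) default).toNat (by omega)]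
  rw [List.getD_eq_getElem _ _ (by simpa using hj)]
  simp only [List.getElem_map, List.getElem_range]
  have : p * 8 + i = 8 * p + i := by ring
  rw [this]
  rfl
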